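-- pv_equiv track=rewrite | github.com/tugraskan/SWATPLUS_HRU_Processor | SRC/core/RoutingTracer.py | _expand_element_tokens
-- ===== SOURCE A (Python) =====
-- def _expand_element_tokens(tokens):
--     """
--     Expand rout_unit.def element tokens.
--
--     SWAT+ uses a negative second token to represent an inclusive range,
--     e.g. "302 -303" means elements 302 and 303.
--     """
--     values = []
--     for token in tokens:
--         try:
--             values.append(int(token))
--         except ValueError:
--             continue
--
--     expanded = []
--     index = 0
--     while index < len(values):
--         if index + 1 < len(values) and values[index + 1] < 0:
--             start = values[index]
--             end = abs(values[index + 1])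
--             if start <= end:
--                 expanded.extend(range(start, end + 1))
--             else:
--                 expanded.extend(range(start, end - 1, -1))
--             index += 2
--         else:
--             expanded.append(values[index])
--             index += 1
--
--     return expanded
-- ===== SOURCE B (Python) =====
-- def _expand_element_tokens(tokens):
--     values = []
--     for token in tokens:
--         try:
--             values.append(int(token))
--         except ValueError:
--             continue
--
--     out = []
--     pending = None
--     for v in values:
--         if pending is not None and v < 0:
--             end = -v
--             if pending <= end:
--                 out.extend(range(pending, end + 1))
--             else:
--                 out.extend(range(pending, end - 1, -1))
--             pending = None
--         else:
--             if pending is not None: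
--                 out.append(pending)
--             pending = v
--     if pending is not None:
--         out.append(pending)
--     return out
-- ===== Notes on version B (the rewrite author's own statement) =====
-- stated objective: simpler
-- what changed: Replaced the index-based while loop with lookahead and skip-by-two by a single forward scan threading a 'pending' previous value that is either emitted plain or merged with a following negative token into an inclusive range.
import Mathlib
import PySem

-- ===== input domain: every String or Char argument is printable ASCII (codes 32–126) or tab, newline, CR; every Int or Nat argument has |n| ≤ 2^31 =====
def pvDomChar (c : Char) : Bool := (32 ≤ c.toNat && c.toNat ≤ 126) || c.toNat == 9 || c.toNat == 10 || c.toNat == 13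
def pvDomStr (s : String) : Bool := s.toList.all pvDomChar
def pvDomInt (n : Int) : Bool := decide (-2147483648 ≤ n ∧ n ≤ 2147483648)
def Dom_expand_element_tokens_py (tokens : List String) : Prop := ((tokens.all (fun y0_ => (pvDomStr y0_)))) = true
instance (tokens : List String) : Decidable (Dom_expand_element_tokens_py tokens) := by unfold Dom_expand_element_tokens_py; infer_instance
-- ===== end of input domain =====

-- B replaces A's index-based while loop (lookahead and skip-by-two) by a single forward
-- scan threading a 'pending' previous value; same return value, objective: simpler.

-- ===== PORT A =====
-- A's while loop inspects values[index] and values[index+1] and advances by 1 or 2;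
-- transcribed as the obvious recursion on the suffix of values starting at index.
def expandLoopA : List Int → List Int
  | [] => []
  | [a] => [a]
  | a :: b :: rest =>
    if b < 0 then
      (if a ≤ |b| then PySem.List.pyRange a (|b| + 1) 1
       else PySem.List.pyRange a (|b| - 1) (-1)) ++ expandLoopA rest
    else
      a :: expandLoopA (b :: rest)

def expand_element_tokens_py (tokens : List String) : List Int :=
  expandLoopA (tokens.filterMap PySem.Int.ofStr?)

-- ===== PORT B =====
-- B's single pass with the pending previous value (None ↦ none).
def expandLoopB : Option Int → List Int → List Int
  | pending, [] =>
    match pending with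
    | some p => [p]
    | none => []
  | pending, v :: rest =>
    match pending with
    | some p =>
      if v < 0 then
        (if p ≤ -v then PySem.List.pyRange p (-v + 1) 1
         else PySem.List.pyRange p (-v - 1) (-1)) ++ expandLoopB none rest
      else
        p :: expandLoopB (some v) rest
    | none => expandLoopB (some v) rest

def expand_element_tokens_py_alt (tokens : List String) : List Int :=
  expandLoopB none (tokens.filterMap PySem.Int.ofStr?)

-- ===== PRECONDITION & SPEC =====
def Spec_expand_element_tokens_py (tokens : List String) (out : List Int) : Prop := out = expand_element_tokens_py_alt tokens
instance (tokens : List String) (out : List Int) : Decidable (Spec_expand_element_tokens_py tokens out) := by unfold Spec_expand_element_tokens_py; infer_instance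

-- ===== CLAIM (what is proved, stated in full; the proofs are below) =====
def Claim_equal_expand_element_tokens_py : Prop := ∀ (tokens : List String), Dom_expand_element_tokens_py tokens → Spec_expand_element_tokens_py tokens (expand_element_tokens_py tokens)

-- ===== LEMMAS AND PROOFS =====
lemma expandLoop_agree (l : List Int) :
    expandLoopA l = expandLoopB none l ∧ ∀ p, expandLoopA (p :: l) = expandLoopB (some p) l := by
  induction l with
  | nil => exact ⟨rfl, fun p => rfl⟩
  | cons v rest ih =>
    refine ⟨?_, ?_⟩
    · exact ih.2 v
    · intro p
      by_cases hv : v < 0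
      · cases rest with
        | nil => simp [expandLoopA, expandLoopB, hv, abs_of_neg hv]
        | cons w ws =>
          simp only [expandLoopA, expandLoopB, hv, abs_of_neg hv, ih.1]
          simp
      · simp [expandLoopA, expandLoopB, hv, ih.2 v]

-- ===== VERDICT (by name: the statement is the Claim_ definition above) =====
theorem expand_element_tokens_py_spec : Claim_equal_expand_element_tokens_py := by
  intro tokens _
  unfold Spec_expand_element_tokens_py expand_element_tokens_py expand_element_tokens_py_alt
  exact (expandLoop_agree _).1
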